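-- pv_equiv track=rewrite | github.com/CharlesLiu7/NQueensProblem | HillClimbingPy/HillClimbingPy.py | make_move_first_choice
-- ===== SOURCE A (Python) =====
-- def make_move_first_choice(board):
--   """
--   calculate the heuristic cost easily if we represent a board as an array where the index is the column and the value is the row.
--   """
--   h_to_beat = get_h_cost(board)
--   for col in range(len(board)):
--     for row in range(len(board)):
--       if board[col] == row:
--         #We don't need to evaluate the current
--         #position, we already know the h-value
--         continue
--
--       board_copy = list(board)
--       #Move the queen to the new row
--       board_copy[col] = row
--       new_h_cost = get_h_cost(board_copy)
--
--       #Return the first better (not best!) match you find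
--       if new_h_cost < h_to_beat:
--         board[col] = row
--         return board
--   return board
--
-- def get_h_cost(board):
--   h = 0
--   for i in range(len(board)):
--     #Check every column we haven't already checked
--     for j in range(i + 1,len(board)):
--       #Queens are in the same row
--       if board[i] == board[j]:
--         h += 1
--       #Get the difference between the current column
--       #and the check column
--       offset = j - i
--       #To be a diagonal, the check column value has to be
--       #equal to the current column value +/- the offset
--       if board[i] == board[j] - offset \
--         or board[i] == board[j] + offset:
--         h += 1
--   return h
-- ===== SOURCE B (Python) =====
-- def _tally(values):
--   t = {}
--   for v in values:
--     t[v] = t.get(v, 0) + 1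
--   return t
--
-- def make_move_first_choice(board):
--   """Hash-tally hill-climbing step: per column, tally the other queens' rows and
--   both diagonals once, so each candidate move's conflict change is an O(1)
--   lookup; mutates board like the original and returns it."""
--   n = len(board)
--   for col in range(n):
--     others = [j for j in range(n) if j != col]
--     rows = _tally([board[j] for j in others])
--     diag_down = _tally([board[j] - j for j in others])
--     diag_up = _tally([board[j] + j for j in others])
--     def conf(row):
--       return rows.get(row, 0) + diag_down.get(row - col, 0) + diag_up.get(row + col, 0)
--     base = conf(board[col])
--     for row in range(n):
--       if row != board[col] and conf(row) < base:
--         board[col] = row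
--         return board
--   return board
-- ===== Notes on version B (the rewrite author's own statement) =====
-- stated objective: faster
-- what changed: Instead of recomputing the full O(n^2) all-pairs heuristic for every candidate move, B tallies the other queens' rows and two diagonals into hash maps once per column, so each candidate move's conflict count is three O(1) lookups compared against the moved queen's current count.
import Mathlib
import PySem

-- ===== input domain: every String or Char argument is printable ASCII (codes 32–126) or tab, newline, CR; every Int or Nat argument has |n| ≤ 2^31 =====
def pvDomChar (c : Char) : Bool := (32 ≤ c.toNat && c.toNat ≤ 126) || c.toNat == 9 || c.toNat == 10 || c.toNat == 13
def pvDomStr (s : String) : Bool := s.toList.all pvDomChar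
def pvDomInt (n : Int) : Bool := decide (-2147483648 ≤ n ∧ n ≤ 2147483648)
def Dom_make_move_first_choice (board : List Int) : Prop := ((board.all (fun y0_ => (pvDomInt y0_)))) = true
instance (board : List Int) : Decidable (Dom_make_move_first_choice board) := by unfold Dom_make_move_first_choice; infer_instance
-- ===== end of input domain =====

-- B replaces A's full O(n^2) heuristic recomputation per candidate move by three hash
-- tallies (rows, both diagonals) built once per column, making each candidate's conflict
-- count a constant number of lookups (equivalence is about the RETURN value; both A and
-- B also mutate the caller's list at the accepted move).

-- ===== PORT A =====
-- inner-loop body of get_h_cost (h += ... for one pair (i, j))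
def hStep (board : List Int) (i : Int) (h : Int) (j : Int) : Int :=
  let h := if PySem.List.pyGetD board i 0 = PySem.List.pyGetD board j 0 then h + 1 else h
  let offset := j - i
  if PySem.List.pyGetD board i 0 = PySem.List.pyGetD board j 0 - offset ∨
     PySem.List.pyGetD board i 0 = PySem.List.pyGetD board j 0 + offset then h + 1 else h

def get_h_cost (board : List Int) : Int :=
  (PySem.List.pyRange 0 (board.length : Int) 1).foldl
    (fun h i => (PySem.List.pyRange (i + 1) (board.length : Int) 1).foldl (hStep board i) h) 0

-- the inner 'for row in range(len(board))' loop of A, with early return as Option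
def aInner (board : List Int) (h_to_beat : Int) (col : Int) : List Int → Option (List Int)
  | [] => none
  | row :: rows =>
    if PySem.List.pyGetD board col 0 = row then aInner board h_to_beat col rows
    else
      let board_copy := PySem.List.pySetD board col row
      if get_h_cost board_copy < h_to_beat then some board_copy
      else aInner board h_to_beat col rows

-- the outer 'for col in range(len(board))' loop of A
def aOuter (board : List Int) (h_to_beat : Int) : List Int → List Int
  | [] => board
  | col :: cols =>
    match aInner board h_to_beat col (PySem.List.pyRange 0 (board.length : Int) 1) with
    | some r => r
    | none => aOuter board h_to_beat cols

def make_move_first_choice (board : List Int) : List Int :=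
  aOuter board (get_h_cost board) (PySem.List.pyRange 0 (board.length : Int) 1)

-- ===== PORT B =====
-- B's _tally helper: t[v] = t.get(v, 0) + 1 over the list
def tally (values : List Int) : PySem.Dict Int Int :=
  values.foldl (fun t v => t.insert v (t.getD v 0 + 1)) PySem.Dict.empty

-- B's conf(row): three O(1) dictionary lookups
def confLookup (rows diag_down diag_up : PySem.Dict Int Int) (col row : Int) : Int :=
  rows.getD row 0 + diag_down.getD (row - col) 0 + diag_up.getD (row + col) 0

-- B's inner 'for row in range(n)' scan, with early return as Option
def bScan (board : List Int) (col : Int) (rows diag_down diag_up : PySem.Dict Int Int)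
    (base : Int) : List Int → Option (List Int)
  | [] => none
  | row :: rest =>
    if row ≠ PySem.List.pyGetD board col 0 ∧ confLookup rows diag_down diag_up col row < base
    then some (PySem.List.pySetD board col row)
    else bScan board col rows diag_down diag_up base rest

-- B's outer 'for col in range(n)' loop: build the three tallies, then scan rows
def bStep (board : List Int) : List Int → List Int
  | [] => board
  | col :: cols =>
    let others := (PySem.List.pyRange 0 (board.length : Int) 1).filter (fun j => j != col)
    let rows := tally (others.map (fun j => PySem.List.pyGetD board j 0))
    let diag_down := tally (others.map (fun j => PySem.List.pyGetD board j 0 - j))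
    let diag_up := tally (others.map (fun j => PySem.List.pyGetD board j 0 + j))
    let base := confLookup rows diag_down diag_up col (PySem.List.pyGetD board col 0)
    match bScan board col rows diag_down diag_up base (PySem.List.pyRange 0 (board.length : Int) 1) with
    | some r => r
    | none => bStep board cols

def make_move_first_choice_alt (board : List Int) : List Int :=
  bStep board (PySem.List.pyRange 0 (board.length : Int) 1)

-- ===== PRECONDITION & SPEC =====
def Spec_make_move_first_choice (board : List Int) (out : List Int) : Prop := out = make_move_first_choice_alt board
instance (board : List Int) (out : List Int) : Decidable (Spec_make_move_first_choice board out) := by unfold Spec_make_move_first_choice; infer_instance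

-- ===== CLAIM (what is proved, stated in full; the proofs are below) =====
def Claim_equal_make_move_first_choice : Prop := ∀ (board : List Int), Dom_make_move_first_choice board → Spec_make_move_first_choice board (make_move_first_choice board)

-- ===== LEMMAS AND PROOFS =====

-- pair cost of the queens at positions i and j (symmetric form of A's inner-loop increment)
def pvQ (b : List Int) (i j : Int) : Int :=
  (if PySem.List.pyGetD b i 0 = PySem.List.pyGetD b j 0 then 1 else 0) +
  (if |PySem.List.pyGetD b i 0 - PySem.List.pyGetD b j 0| = |i - j| then (1 : Int) else 0)

-- conflict contribution of board position j against a queen at (c, r)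
def pvRow (b : List Int) (c r j : Int) : Int :=
  (if PySem.List.pyGetD b j 0 = r then 1 else 0) +
  (if |PySem.List.pyGetD b j 0 - r| = |j - c| then (1 : Int) else 0)

-- total conflicts of a queen at (c, r) against all other board positions, as a sum
def pvConfSum (b : List Int) (c r : Int) : Int :=
  ((PySem.List.pyRange 0 c 1).map (pvRow b c r)).sum
    + ((PySem.List.pyRange (c + 1) (b.length : Int) 1).map (pvRow b c r)).sum

-- the pairs of get_h_cost not involving column c (n = board length as Int)
def pvRest (b : List Int) (n c : Int) : Int :=
  ((PySem.List.pyRange 0 c 1).map (fun i =>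
      ((PySem.List.pyRange (i + 1) c 1).map (pvQ b i)).sum +
      ((PySem.List.pyRange (c + 1) n 1).map (pvQ b i)).sum)).sum +
  ((PySem.List.pyRange (c + 1) n 1).map (fun i =>
      ((PySem.List.pyRange (i + 1) n 1).map (pvQ b i)).sum)).sum

lemma pv_arith_iff (x y i j : Int) (hij : i < j) :
    (x = y - (j - i) ∨ x = y + (j - i)) ↔ |x - y| = |i - j| := by
  rw [abs_sub_comm i j, abs_of_nonneg (by omega : (0 : Int) ≤ j - i),
    abs_eq (by omega : (0 : Int) ≤ j - i)]
  constructor <;> rintro (h1 | h1) <;> omega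

lemma pv_inner_fold (b : List Int) (i h n : Int) :
    (PySem.List.pyRange (i + 1) n 1).foldl (hStep b i) h
      = h + ((PySem.List.pyRange (i + 1) n 1).map (pvQ b i)).sum := by
  rw [PySem.List.foldl_congr_mem _ _ (fun acc j => acc + pvQ b i j) _ ?_,
    PySem.List.foldl_add]
  intro acc j hj
  have hij : i < j := by have := (PySem.List.mem_pyRange_one.mp hj).1; omega
  simp only [hStep, pvQ, pv_arith_iff _ _ _ _ hij]
  split_ifs <;> ring

lemma pv_h_eq_sum (b : List Int) :
    get_h_cost b
      = ((PySem.List.pyRange 0 (b.length : Int) 1).map (fun i =>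
          ((PySem.List.pyRange (i + 1) (b.length : Int) 1).map (pvQ b i)).sum)).sum := by
  unfold get_h_cost
  rw [PySem.List.foldl_congr_mem _ _
      (fun acc i => acc + ((PySem.List.pyRange (i + 1) (b.length : Int) 1).map (pvQ b i)).sum) _
      (fun acc i _ => pv_inner_fold b i acc _),
    PySem.List.foldl_add, zero_add]

lemma pv_h_decomp (b : List Int) (c : Int) (hc : 0 ≤ c) (hlt : c < (b.length : Int)) :
    get_h_cost b
      = pvRest b (b.length : Int) c
        + (((PySem.List.pyRange 0 c 1).map (fun i => pvQ b i c)).sum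
           + ((PySem.List.pyRange (c + 1) (b.length : Int) 1).map (fun j => pvQ b c j)).sum) := by
  rw [pv_h_eq_sum,
    PySem.List.pyRange_one_append 0 c (b.length : Int) hc (le_of_lt hlt),
    PySem.List.pyRange_one_cons hlt, List.map_append, List.sum_append,
    List.map_cons, List.sum_cons]
  rw [List.map_congr_left (g := fun i =>
        (((PySem.List.pyRange (i + 1) c 1).map (pvQ b i)).sum
          + ((PySem.List.pyRange (c + 1) (b.length : Int) 1).map (pvQ b i)).sum)
        + pvQ b i c)
      (fun i hi => by
        have hic := PySem.List.mem_pyRange_one.mp hi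
        rw [PySem.List.pyRange_one_append (i + 1) c (b.length : Int) (by omega) (le_of_lt hlt),
          PySem.List.pyRange_one_cons hlt, List.map_append, List.sum_append,
          List.map_cons, List.sum_cons]
        ring)]
  rw [PySem.List.sum_map_add_int]
  unfold pvRest
  ring

lemma pv_getD_set_ne (b : List Int) (cn : Nat) (v : Int) (j : Int) (h0 : 0 ≤ j) (hne : j ≠ (cn : Int)) :
    PySem.List.pyGetD (b.set cn v) j 0 = PySem.List.pyGetD b j 0 := by
  obtain ⟨m, rfl⟩ := Int.eq_ofNat_of_zero_le h0
  have hmn : m ≠ cn := by omega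
  rw [PySem.List.pyGetD_natCast, PySem.List.pyGetD_natCast,
    List.getD_eq_getElem?_getD, List.getD_eq_getElem?_getD,
    List.getElem?_set_ne (by omega)]

lemma pv_getD_set_self (b : List Int) (cn : Nat) (v : Int) (h : cn < b.length) :
    PySem.List.pyGetD (b.set cn v) (cn : Int) 0 = v := by
  rw [PySem.List.pyGetD_natCast, List.getD_eq_getElem?_getD, List.getElem?_set_self h]
  rfl

-- pvQ with one argument at column c, seen as a pvRow against the queen's own row
lemma pv_q_col_right (b : List Int) (c i : Int) :
    pvQ b i c = pvRow b c (PySem.List.pyGetD b c 0) i := rfl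

lemma pv_q_col_left (b : List Int) (c j : Int) :
    pvQ b c j = pvRow b c (PySem.List.pyGetD b c 0) j := by
  simp only [pvQ, pvRow, eq_comm (a := PySem.List.pyGetD b c 0),
    abs_sub_comm (PySem.List.pyGetD b c 0), abs_sub_comm c j]

-- pvQ / pvRest are unchanged by setting column cn when no index touches cn
lemma pv_q_set_ne (b : List Int) (cn : Nat) (v : Int) (i j : Int)
    (hi0 : 0 ≤ i) (hi : i ≠ (cn : Int)) (hj0 : 0 ≤ j) (hj : j ≠ (cn : Int)) :
    pvQ (b.set cn v) i j = pvQ b i j := by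
  simp only [pvQ, pv_getD_set_ne b cn v i hi0 hi, pv_getD_set_ne b cn v j hj0 hj]

lemma pv_rest_set (b : List Int) (cn : Nat) (v : Int) :
    pvRest (b.set cn v) ((b.set cn v).length : Int) (cn : Int)
      = pvRest b (b.length : Int) (cn : Int) := by
  rw [List.length_set]
  unfold pvRest
  congr 1
  · refine congrArg _ (List.map_congr_left (fun i hi => ?_))
    have hic := PySem.List.mem_pyRange_one.mp hi
    congr 1
    · exact congrArg _ (List.map_congr_left (fun j hj => by
        have := PySem.List.mem_pyRange_one.mp hj
        exact pv_q_set_ne b cn v i j (by omega) (by omega) (by omega) (by omega)))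
    · exact congrArg _ (List.map_congr_left (fun j hj => by
        have := PySem.List.mem_pyRange_one.mp hj
        exact pv_q_set_ne b cn v i j (by omega) (by omega) (by omega) (by omega)))
  · refine congrArg _ (List.map_congr_left (fun i hi => ?_))
    have hic := PySem.List.mem_pyRange_one.mp hi
    exact congrArg _ (List.map_congr_left (fun j hj => by
      have := PySem.List.mem_pyRange_one.mp hj
      exact pv_q_set_ne b cn v i j (by omega) (by omega) (by omega) (by omega)))

-- the incremental-update identity: moving the queen of column cn to row r changes the
-- full heuristic by exactly the change of that queen's own conflict sum
lemma pv_key (b : List Int) (cn : Nat) (r : Int) (hc : cn < b.length) :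
    get_h_cost (b.set cn r) + pvConfSum b (cn : Int) (PySem.List.pyGetD b (cn : Int) 0)
      = get_h_cost b + pvConfSum b (cn : Int) r := by
  have hc0 : (0 : Int) ≤ (cn : Int) := by positivity
  have hcl : (cn : Int) < (b.length : Int) := by exact_mod_cast hc
  have hcl' : (cn : Int) < ((b.set cn r).length : Int) := by rw [List.length_set]; exact hcl
  rw [pv_h_decomp (b.set cn r) (cn : Int) hc0 hcl', pv_h_decomp b (cn : Int) hc0 hcl,
    pv_rest_set b cn r]
  unfold pvConfSum
  rw [List.length_set]
  have h1 : ((PySem.List.pyRange 0 (cn : Int) 1).map (fun i => pvQ (b.set cn r) i (cn : Int))).sum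
      = ((PySem.List.pyRange 0 (cn : Int) 1).map (pvRow b (cn : Int) r)).sum := by
    refine congrArg _ (List.map_congr_left (fun i hi => ?_))
    have := PySem.List.mem_pyRange_one.mp hi
    simp only [pvQ, pvRow, pv_getD_set_ne b cn r i (by omega) (by omega),
      pv_getD_set_self b cn r hc]
  have h2 : ((PySem.List.pyRange ((cn : Int) + 1) (b.length : Int) 1).map
        (fun j => pvQ (b.set cn r) (cn : Int) j)).sum
      = ((PySem.List.pyRange ((cn : Int) + 1) (b.length : Int) 1).map (pvRow b (cn : Int) r)).sum := by
    refine congrArg _ (List.map_congr_left (fun j hj => ?_))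
    have := PySem.List.mem_pyRange_one.mp hj
    simp only [pvQ, pvRow, pv_getD_set_ne b cn r j (by omega) (by omega),
      pv_getD_set_self b cn r hc, eq_comm (a := r), abs_sub_comm r, abs_sub_comm (cn : Int) j]
  have h3 : ((PySem.List.pyRange 0 (cn : Int) 1).map (fun i => pvQ b i (cn : Int))).sum
      = ((PySem.List.pyRange 0 (cn : Int) 1).map (pvRow b (cn : Int) (PySem.List.pyGetD b (cn : Int) 0))).sum := by
    exact congrArg _ (List.map_congr_left (fun i _ => pv_q_col_right b (cn : Int) i))
  have h4 : ((PySem.List.pyRange ((cn : Int) + 1) (b.length : Int) 1).map (fun j => pvQ b (cn : Int) j)).sum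
      = ((PySem.List.pyRange ((cn : Int) + 1) (b.length : Int) 1).map
          (pvRow b (cn : Int) (PySem.List.pyGetD b (cn : Int) 0))).sum := by
    exact congrArg _ (List.map_congr_left (fun j _ => pv_q_col_left b (cn : Int) j))
  rw [h1, h2, h3, h4]
  ring

-- a tally lookup is a count
lemma pv_tally_getD (l : List Int) (v : Int) : (tally l).getD v 0 = (l.count v : Int) := by
  rw [tally, PySem.Dict.foldl_insert_getD_add_one_eq_counter, PySem.Dict.getD_counter]

-- three counts over any index list avoiding c add up to the pvRow sum
lemma pv_counts_eq_sum (b : List Int) (c row : Int) (S : List Int) (h : ∀ j ∈ S, j ≠ c) :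
    ((S.map (fun j => PySem.List.pyGetD b j 0)).count row : Int)
      + ((S.map (fun j => PySem.List.pyGetD b j 0 - j)).count (row - c) : Int)
      + ((S.map (fun j => PySem.List.pyGetD b j 0 + j)).count (row + c) : Int)
      = (S.map (pvRow b c row)).sum := by
  induction S with
  | nil => simp
  | cons j S ih =>
    have hj : j ≠ c := h j List.mem_cons_self
    have ihS := ih (fun x hx => h x (List.mem_cons_of_mem _ hx))
    simp only [List.map_cons, List.count_cons, List.sum_cons, beq_iff_eq]
    push_cast
    rw [← ihS]
    have habs : |PySem.List.pyGetD b j 0 - row| = |j - c| ↔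
        (PySem.List.pyGetD b j 0 - j = row - c ∨ PySem.List.pyGetD b j 0 + j = row + c) := by
      rw [abs_eq_abs]; omega
    simp only [pvRow, habs]
    split_ifs <;> omega

-- the 'others' comprehension splits the range around c
lemma pv_others (b : List Int) (c : Int) (h0 : 0 ≤ c) (hlt : c < (b.length : Int)) :
    (PySem.List.pyRange 0 (b.length : Int) 1).filter (fun j => j != c)
      = PySem.List.pyRange 0 c 1 ++ PySem.List.pyRange (c + 1) (b.length : Int) 1 := by
  rw [PySem.List.pyRange_one_append 0 c (b.length : Int) h0 (le_of_lt hlt),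
    PySem.List.pyRange_one_cons hlt, List.filter_append, List.filter_cons]
  rw [List.filter_eq_self.mpr (fun j hj => by
      have := PySem.List.mem_pyRange_one.mp hj
      simp only [bne_iff_ne]; omega),
    List.filter_eq_self.mpr (fun j hj => by
      have := PySem.List.mem_pyRange_one.mp hj
      simp only [bne_iff_ne]; omega)]
  simp

-- B's three dictionary lookups compute exactly the conflict sum
lemma pv_conf_eq (b : List Int) (c row : Int) (h0 : 0 ≤ c) (hlt : c < (b.length : Int)) :
    confLookup
      (tally (((PySem.List.pyRange 0 (b.length : Int) 1).filter (fun j => j != c)).map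
        (fun j => PySem.List.pyGetD b j 0)))
      (tally (((PySem.List.pyRange 0 (b.length : Int) 1).filter (fun j => j != c)).map
        (fun j => PySem.List.pyGetD b j 0 - j)))
      (tally (((PySem.List.pyRange 0 (b.length : Int) 1).filter (fun j => j != c)).map
        (fun j => PySem.List.pyGetD b j 0 + j)))
      c row = pvConfSum b c row := by
  unfold confLookup
  rw [pv_tally_getD, pv_tally_getD, pv_tally_getD,
    pv_counts_eq_sum b c row _ (fun j hj => by
      have := (List.mem_filter.mp hj).2
      exact bne_iff_ne.mp this),
    pv_others b c h0 hlt, List.map_append, List.sum_append]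
  rfl

-- A's inner row loop equals B's scan with the tally lookups
lemma pv_scan_eq (b : List Int) (cn : Nat) (hc : cn < b.length) (rows : List Int) :
    aInner b (get_h_cost b) (cn : Int) rows
      = bScan b (cn : Int)
          (tally (((PySem.List.pyRange 0 (b.length : Int) 1).filter (fun j => j != (cn : Int))).map
            (fun j => PySem.List.pyGetD b j 0)))
          (tally (((PySem.List.pyRange 0 (b.length : Int) 1).filter (fun j => j != (cn : Int))).map
            (fun j => PySem.List.pyGetD b j 0 - j)))
          (tally (((PySem.List.pyRange 0 (b.length : Int) 1).filter (fun j => j != (cn : Int))).map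
            (fun j => PySem.List.pyGetD b j 0 + j)))
          (pvConfSum b (cn : Int) (PySem.List.pyGetD b (cn : Int) 0))
          rows := by
  have hc0 : (0 : Int) ≤ (cn : Int) := by positivity
  have hcl : (cn : Int) < (b.length : Int) := by exact_mod_cast hc
  induction rows with
  | nil => rfl
  | cons row rest ih =>
    simp only [aInner, bScan]
    rw [pv_conf_eq b (cn : Int) row hc0 hcl]
    by_cases heq : PySem.List.pyGetD b (cn : Int) 0 = row
    · rw [if_pos heq, if_neg (fun hcon => hcon.1 heq.symm), ih]
    · rw [if_neg heq]
      have hset : PySem.List.pySetD b (cn : Int) row = b.set cn row :=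
        PySem.List.pySetD_natCast b cn row
      have hiff : get_h_cost (PySem.List.pySetD b (cn : Int) row) < get_h_cost b
          ↔ pvConfSum b (cn : Int) row
              < pvConfSum b (cn : Int) (PySem.List.pyGetD b (cn : Int) 0) := by
        rw [hset]
        have := pv_key b cn row hc
        omega
      by_cases hlt : get_h_cost (PySem.List.pySetD b (cn : Int) row) < get_h_cost b
      · rw [if_pos hlt, if_pos ⟨fun h => heq h.symm, hiff.mp hlt⟩]
      · rw [if_neg hlt, if_neg (fun hcon => hlt (hiff.mpr hcon.2)), ih]

lemma pv_outer_eq (b : List Int) (cols : List Int)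
    (h : ∀ c ∈ cols, 0 ≤ c ∧ c < (b.length : Int)) :
    aOuter b (get_h_cost b) cols = bStep b cols := by
  induction cols with
  | nil => rfl
  | cons col cols ih =>
    obtain ⟨hc0, hcl⟩ := h col List.mem_cons_self
    obtain ⟨cn, rfl⟩ := Int.eq_ofNat_of_zero_le hc0
    have hcn : cn < b.length := by exact_mod_cast hcl
    simp only [aOuter, bStep]
    rw [pv_conf_eq b (cn : Int) (PySem.List.pyGetD b (cn : Int) 0) (by positivity) (by exact_mod_cast hcn),
      ← pv_scan_eq b cn hcn, ih (fun c hcm => h c (List.mem_cons_of_mem _ hcm))]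

-- ===== VERDICT (by name: the statement is the Claim_ definition above) =====
theorem make_move_first_choice_spec : Claim_equal_make_move_first_choice := by
  intro board _
  unfold Spec_make_move_first_choice make_move_first_choice make_move_first_choice_alt
  exact pv_outer_eq board _ (fun c hc => by
    have := PySem.List.mem_pyRange_one.mp hc; exact ⟨this.1, this.2⟩)
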